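-- pv_equiv track=rewrite | github.com/Filipekann/AdventOfCode2024 | Day3/corruptedMemory.py | remove_unnecesasry
-- ===== SOURCE A (Python) =====
-- def remove_unnecesasry(list):
--     keep = True
--     keep_list = []
--     for match in list:
--         if match == "do()":
--             keep = True
--         elif match == "don't()":
--             keep = False
--
--         if keep and match != "do()" and match != "don't()":
--             keep_list.append(match)
--
--     return keep_list
-- ===== SOURCE B (Python) =====
-- def remove_unnecesasry(list):
--     # Pass 1: compute the post-update keep-state for each element.
--     states = []
--     s = True
--     for m in list:
--         if m == "do()":
--             s = True
--         elif m == "don't()":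
--             s = False
--         states.append(s)
--     # Pass 2: keep elements whose state is active and which are not markers.
--     return [m for m, st in zip(list, states)
--             if st and m != "do()" and m != "don't()"]
-- ===== Notes on version B (the rewrite author's own statement) =====
-- stated objective: alternative
-- what changed: Replaces the single interleaved loop (flag updated and element appended in one pass) by a two-pass decomposition: a scan computing the running keep-state sequence, then a zip-and-filter selecting the kept elements.
import Mathlib
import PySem

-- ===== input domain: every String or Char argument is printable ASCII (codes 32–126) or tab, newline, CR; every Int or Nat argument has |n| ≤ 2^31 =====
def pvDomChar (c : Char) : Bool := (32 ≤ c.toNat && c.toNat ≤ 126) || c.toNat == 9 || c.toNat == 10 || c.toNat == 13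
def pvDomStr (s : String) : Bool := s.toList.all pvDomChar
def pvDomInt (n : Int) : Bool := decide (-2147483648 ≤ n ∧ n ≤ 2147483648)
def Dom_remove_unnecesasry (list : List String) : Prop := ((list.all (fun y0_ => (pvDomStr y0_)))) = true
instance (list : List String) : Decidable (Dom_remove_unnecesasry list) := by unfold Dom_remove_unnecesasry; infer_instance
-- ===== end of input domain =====

-- B is a two-pass decomposition (state scan, then zip-and-filter) of A's single interleaved loop; same value on all inputs.

-- ===== PORT A =====
def remove_unnecesasry (list : List String) : List String :=
  (list.foldl (fun (st : Bool × List String) m =>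
      let keep := if m = "do()" then true
                  else if m = "don't()" then false
                  else st.1
      (keep,
       if keep && !(m = "do()") && !(m = "don't()") then st.2 ++ [m] else st.2))
    (true, [])).2

-- ===== PORT B =====
-- step of the state scan (pass 1's loop body)
def pvStep (s : Bool) (m : String) : Bool :=
  if m = "do()" then true else if m = "don't()" then false else s

-- pass 1: post-update state for each element
def pvStates (s : Bool) : List String → List Bool
  | [] => []
  | m :: rest =>
      let s' := pvStep s m
      s' :: pvStates s' rest

def remove_unnecesasry_alt (list : List String) : List String :=
  ((list.zip (pvStates true list)).filter
      (fun p => p.2 && !(p.1 = "do()") && !(p.1 = "don't()"))).map Prod.fst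

-- ===== PRECONDITION & SPEC =====
def Spec_remove_unnecesasry (list : List String) (out : List String) : Prop := out = remove_unnecesasry_alt list
instance (list : List String) (out : List String) : Decidable (Spec_remove_unnecesasry list out) := by unfold Spec_remove_unnecesasry; infer_instance

-- ===== CLAIM (what is proved, stated in full; the proofs are below) =====
def Claim_equal_remove_unnecesasry : Prop := ∀ (list : List String), Dom_remove_unnecesasry list → Spec_remove_unnecesasry list (remove_unnecesasry list)

-- ===== LEMMAS AND PROOFS =====

theorem pv_fold_eq (l : List String) : ∀ (s : Bool) (acc : List String),
    (l.foldl (fun (st : Bool × List String) m =>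
        let keep := if m = "do()" then true
                    else if m = "don't()" then false
                    else st.1
        (keep,
         if keep && !(m = "do()") && !(m = "don't()") then st.2 ++ [m] else st.2))
      (s, acc)).2
    = acc ++ ((l.zip (pvStates s l)).filter
        (fun p => p.2 && !(p.1 = "do()") && !(p.1 = "don't()"))).map Prod.fst := by
  induction l with
  | nil => intro s acc; simp [pvStates]
  | cons m rest ih =>
      intro s acc
      simp only [List.foldl_cons, pvStates, List.zip_cons_cons, List.filter_cons]
      by_cases h : (pvStep s m && !(m = "do()") && !(m = "don't()")) = true
      · rw [if_pos h]
        have : (if m = "do()" then true else if m = "don't()" then false else s) = pvStep s m := rfl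
        simp only [this, h, if_pos]
        rw [ih]
        simp
      · rw [if_neg h]
        have : (if m = "do()" then true else if m = "don't()" then false else s) = pvStep s m := rfl
        have h' := eq_false_of_ne_true h
        simp only [this, h']
        rw [ih]
        simp

-- ===== VERDICT (by name: the statement is the Claim_ definition above) =====
theorem remove_unnecesasry_spec : Claim_equal_remove_unnecesasry := by
  intro l _
  show remove_unnecesasry l = remove_unnecesasry_alt l
  unfold remove_unnecesasry remove_unnecesasry_alt
  rw [pv_fold_eq]
  simp
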